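-- pv_equiv track=rewrite | github.com/TheTaskTerminator/AFSA | backend/app/agents/tools/code_tools.py | _break_long_line
-- ===== SOURCE A (Python) =====
-- def _break_long_line(line: str, max_length: int, indent: int) -> str:
--     """Attempt to break a long line."""
--     if len(line) <= max_length:
--         return line
--
--     # Find a good break point
--     break_chars = [",", " ", "+", "-", "*", "/", "(", "["]
--
--     for char in break_chars:
--         idx = line.rfind(char, 0, max_length)
--         if idx > 20:  # Don't break too early
--             indent_str = " " * indent
--             return line[:idx + 1] + "\n" + indent_str + line[idx + 1:].lstrip()
--
--     return line  # Can't break nicely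
-- ===== SOURCE B (Python) =====
-- def _break_long_line(line: str, max_length: int, indent: int) -> str:
--     """Attempt to break a long line (candidate selection by a max with a lexicographic key)."""
--     if len(line) <= max_length:
--         return line
--
--     # Collect every usable break position in one comprehension, then pick the
--     # best one with max(): highest priority first (negated rank), rightmost
--     # position second.
--     prio = {",": 0, " ": 1, "+": 2, "-": 3, "*": 4, "/": 5, "(": 6, "[": 7}
--     candidates = [(-prio[c], j) for j, c in enumerate(line[:max_length]) if j > 20 and c in prio]
--     if not candidates:
--         return line
--
--     _, idx = max(candidates)
--     return line[:idx + 1] + "\n" + " " * indent + line[idx + 1:].lstrip()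
-- ===== Notes on version B (the rewrite author's own statement) =====
-- stated objective: alternative
-- what changed: Instead of A's ordered search (one rfind scan per break character, returning at the first priority hit), B collects all usable break positions in a single comprehension pass and selects the split point with max() under the lexicographic key (-priority, index).
import Mathlib
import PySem

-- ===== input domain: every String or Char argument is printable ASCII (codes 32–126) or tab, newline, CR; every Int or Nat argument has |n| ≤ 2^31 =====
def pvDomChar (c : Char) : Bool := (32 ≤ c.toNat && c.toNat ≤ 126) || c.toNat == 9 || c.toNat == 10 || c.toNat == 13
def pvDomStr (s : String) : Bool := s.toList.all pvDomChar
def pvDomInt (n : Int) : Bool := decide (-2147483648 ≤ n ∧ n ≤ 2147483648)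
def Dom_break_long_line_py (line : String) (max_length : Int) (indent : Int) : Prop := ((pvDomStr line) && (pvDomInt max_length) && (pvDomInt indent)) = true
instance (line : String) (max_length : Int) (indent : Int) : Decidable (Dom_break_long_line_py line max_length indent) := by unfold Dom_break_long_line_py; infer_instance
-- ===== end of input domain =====

-- B replaces A's ordered search (one rfind scan per break character, returning at the first
-- priority hit) by one comprehension pass collecting all usable break positions, then a
-- max() under the lexicographic key (-priority, index) (objective: alternative, similar cost).

-- ===== PORT A =====
-- break_chars = [",", " ", "+", "-", "*", "/", "(", "["]
def blBreakCharsA : List String := [",", " ", "+", "-", "*", "/", "(", "["]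

-- the 'for char in break_chars' loop of A
def blLoopA (line : String) (max_length : Int) (indent : Int) : List String → String
  | [] => line
  | c :: rest =>
    let idx := PySem.Str.rfindFrom line c 0 (some max_length)
    if 20 < idx then
      String.ofList (PySem.Chars.slice line.toList none (some (idx + 1)) ++
        '\n' :: (PySem.List.pyRepeat [' '] indent ++
          PySem.Chars.lstrip (PySem.Chars.slice line.toList (some (idx + 1)) none)))
    else blLoopA line max_length indent rest

def break_long_line_py (line : String) (max_length : Int) (indent : Int) : String :=
  if PySem.Str.len line ≤ max_length then line
  else blLoopA line max_length indent blBreakCharsA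

-- ===== PORT B =====
-- prio = {",": 0, " ": 1, "+": 2, "-": 3, "*": 4, "/": 5, "(": 6, "[": 7}
def blPrio : PySem.Dict Char Int :=
  PySem.Dict.ofList [(',', 0), (' ', 1), ('+', 2), ('-', 3), ('*', 4), ('/', 5), ('(', 6), ('[', 7)]

-- candidates = [(-prio[c], j) for j, c in enumerate(line[:max_length]) if j > 20 and c in prio]
def blCandidates (region : List Char) : List (Int × Int) :=
  ((PySem.List.enumerate region 0).filter
      (fun p => decide (20 < p.1) && (blPrio.get? p.2).isSome)).map
    (fun p => (-(blPrio.getD p.2 0), p.1))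

-- 'if not candidates: return line; _, idx = max(candidates); …' — Python max over int pairs is
-- max2? with the pair's own components as the (lexicographic) key
def break_long_line_py_alt (line : String) (max_length : Int) (indent : Int) : String :=
  if PySem.Str.len line ≤ max_length then line
  else
    match PySem.List.max2? (blCandidates (PySem.Chars.slice line.toList none (some max_length)))
        (fun p => p.1) (fun p => p.2) with
    | none => line
    | some m =>
      String.ofList (PySem.Chars.slice line.toList none (some (m.2 + 1)) ++
        '\n' :: (PySem.List.pyRepeat [' '] indent ++
          PySem.Chars.lstrip (PySem.Chars.slice line.toList (some (m.2 + 1)) none)))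

-- ===== PRECONDITION & SPEC =====
def Spec_break_long_line_py (line : String) (max_length : Int) (indent : Int) (out : String) : Prop := out = break_long_line_py_alt line max_length indent
instance (line : String) (max_length : Int) (indent : Int) (out : String) : Decidable (Spec_break_long_line_py line max_length indent out) := by unfold Spec_break_long_line_py; infer_instance

-- ===== CLAIM (what is proved, stated in full; the proofs are below) =====
def Claim_equal_break_long_line_py : Prop := ∀ (line : String) (max_length : Int) (indent : Int), Dom_break_long_line_py line max_length indent → Spec_break_long_line_py line max_length indent (break_long_line_py line max_length indent)

-- ===== LEMMAS AND PROOFS =====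

-- the break chars with their priority ranks, in A's search order
def blRanked : List (Int × Char) := [(0, ','), (1, ' '), (2, '+'), (3, '-'), (4, '*'), (5, '/'), (6, '('), (7, '[')]

-- A's ordered search, abstracted over the per-char rightmost-position function f
def blPick (f : Char → Int) : List (Int × Char) → Option (Int × Int)
  | [] => none
  | (r, c) :: rest => if 20 < f c then some (-r, f c) else blPick f rest

-- the step a Python max over pairs performs (ties keep the earlier element)
def blLexStep (m y : Int × Int) : Int × Int :=
  if (decide (m.1 < y.1) || !decide (y.1 < m.1) && decide (m.2 < y.2)) then y else m

lemma max2?_snoc (xs : List (Int × Int)) (y : Int × Int) :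
    PySem.List.max2? (xs ++ [y]) (fun p => p.1) (fun p => p.2) =
      some (match PySem.List.max2? xs (fun p => p.1) (fun p => p.2) with
        | none => y
        | some m => blLexStep m y) := by
  simp only [PySem.List.max2?, List.foldl_append, List.foldl_cons, List.foldl_nil]
  cases List.foldl _ none xs with
  | none => rfl
  | some m =>
    simp [blLexStep]
    split <;> rfl

lemma blPrio_mk : blPrio = PySem.Dict.mk [(',', 0), (' ', 1), ('+', 2), ('-', 3), ('*', 4), ('/', 5), ('(', 6), ('[', 7)] := by rfl

lemma get?_blPrio (d : Char) :
    blPrio.get? d =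
      if ',' = d then some 0 else if ' ' = d then some 1 else if '+' = d then some 2
      else if '-' = d then some 3 else if '*' = d then some 4 else if '/' = d then some 5
      else if '(' = d then some 6 else if '[' = d then some 7 else none := by
  rw [blPrio_mk]
  simp only [PySem.Dict.get?_mk_cons, beq_iff_eq]
  simp [PySem.Dict.get?]

-- checking a single-char prefix only looks at the head, so a trailing element is invisible
lemma prefix_single_snoc (cs : List Char) (d c : Char) (i : Nat) (h : i < cs.length) :
    [c].isPrefixOf (List.drop i (cs ++ [d])) = [c].isPrefixOf (List.drop i cs) := by
  rw [List.drop_append_of_le_length (by omega)]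
  cases hcs : List.drop i cs with
  | nil => exact absurd (List.drop_eq_nil_iff.mp hcs) (by omega)
  | cons x t => simp [List.isPrefixOf]

lemma go_snoc (cs : List Char) (d c : Char) (k : Nat) (hk : k < cs.length) :
    PySem.Chars.rfind.go (cs ++ [d]) [c] k = PySem.Chars.rfind.go cs [c] k := by
  induction k with
  | zero =>
    cases cs with
    | nil => exact absurd hk (by simp)
    | cons x t => simp [PySem.Chars.rfind.go, List.isPrefixOf, List.cons_append]
  | succ j ih =>
    simp only [PySem.Chars.rfind.go, prefix_single_snoc cs d c (j+1) hk]
    split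
    · rfl
    · exact ih (by omega)

-- rfind of a single char over a snoc list: last element wins, otherwise recurse
lemma rfind_single_snoc (cs : List Char) (d c : Char) :
    PySem.Chars.rfind (cs ++ [d]) [c] =
      if d = c then (cs.length : Int) else PySem.Chars.rfind cs [c] := by
  unfold PySem.Chars.rfind
  have hlen : (cs ++ [d]).length = cs.length + 1 := by simp
  rw [hlen]
  have hdrop : List.drop (cs.length + 1) (cs ++ [d]) = [] := by
    apply List.drop_eq_nil_iff.mpr; simp
  rw [show PySem.Chars.rfind.go (cs ++ [d]) [c] (cs.length + 1)
        = if [c].isPrefixOf (List.drop (cs.length + 1) (cs ++ [d])) then ((cs.length : Int) + 1)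
          else PySem.Chars.rfind.go (cs ++ [d]) [c] cs.length from rfl]
  rw [hdrop]
  simp only [List.isPrefixOf, Bool.false_eq_true, if_false]
  cases cs with
  | nil =>
    simp only [List.nil_append, List.length_nil]
    show (if [c].isPrefixOf [d] then (0:Int) else -1) = _
    by_cases h : d = c <;> simp [List.isPrefixOf, h, PySem.Chars.rfind.go]
    · intro hcd; exact absurd hcd.symm h
  | cons x t =>
    have hn : (x :: t).length = t.length + 1 := rfl
    rw [hn]
    have hdrop2 : List.drop (t.length + 1) ((x :: t) ++ [d]) = [d] := by
      simp
    rw [show PySem.Chars.rfind.go ((x :: t) ++ [d]) [c] (t.length + 1)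
          = if [c].isPrefixOf (List.drop (t.length + 1) ((x :: t) ++ [d])) then ((t.length : Int) + 1)
            else PySem.Chars.rfind.go ((x :: t) ++ [d]) [c] t.length from rfl]
    rw [hdrop2]
    have hgo := go_snoc (x :: t) d c t.length (by simp)
    by_cases h : d = c
    · simp [List.isPrefixOf, h]
    · have hpc : [c].isPrefixOf [d] = false := by
        simp [List.isPrefixOf]; intro hcd; exact absurd hcd.symm h
      rw [hpc]
      simp only [Bool.false_eq_true, if_false, if_neg h, hgo]
      conv_rhs => rw [show PySem.Chars.rfind.go (x :: t) [c] (t.length + 1)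
            = if [c].isPrefixOf (List.drop (t.length + 1) (x :: t)) then ((t.length : Int) + 1)
              else PySem.Chars.rfind.go (x :: t) [c] t.length from rfl]
      have hnil3 : List.drop (t.length + 1) (x :: t) = [] := by
        apply List.drop_eq_nil_iff.mpr; simp
      rw [hnil3]
      simp [List.isPrefixOf]

lemma go_le (s : List Char) (c : Char) (k : Nat) :
    PySem.Chars.rfind.go s [c] k ≤ (k : Int) := by
  induction k with
  | zero => simp [PySem.Chars.rfind.go]; split <;> omega
  | succ j ih =>
    rw [show PySem.Chars.rfind.go s [c] (j + 1)
          = if [c].isPrefixOf (List.drop (j + 1) s) then ((j : Int) + 1)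
            else PySem.Chars.rfind.go s [c] j from rfl]
    split
    · omega
    · omega

lemma rfind_single_lt_length (cs : List Char) (c : Char) :
    PySem.Chars.rfind cs [c] < (cs.length : Int) := by
  unfold PySem.Chars.rfind
  cases cs with
  | nil => simp [PySem.Chars.rfind.go, List.isPrefixOf]
  | cons x t =>
    rw [show (x :: t).length = t.length + 1 from rfl]
    rw [show PySem.Chars.rfind.go (x :: t) [c] (t.length + 1)
          = if [c].isPrefixOf (List.drop (t.length + 1) (x :: t)) then ((t.length : Int) + 1)
            else PySem.Chars.rfind.go (x :: t) [c] t.length from rfl]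
    have hnil : List.drop (t.length + 1) (x :: t) = [] := by
      apply List.drop_eq_nil_iff.mpr; simp
    rw [hnil]
    simp only [List.isPrefixOf, Bool.false_eq_true, if_false]
    have := go_le (x :: t) c t.length
    push_cast
    omega

lemma rfind_nil (c : Char) : PySem.Chars.rfind ([] : List Char) [c] = -1 := rfl

-- rfind(c, 0, m) is rfind over the slice line[:m]
lemma rfindFrom_zero_eq (s : List Char) (c : Char) (m : Int) :
    PySem.Chars.rfindFrom s [c] 0 (some m) =
      PySem.Chars.rfind (PySem.List.slice s none (some m)) [c] := by
  unfold PySem.Chars.rfindFrom PySem.List.slice PySem.List.clampIdx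
  simp only [show ¬ ((0:Int) < 0) from by omega, if_false, List.drop_zero, zero_add,
    Int.toNat_zero, Nat.sub_zero]
  split_ifs with h1 h2 h3 h4 h5
  all_goals first
    | (exfalso; omega)
    | (simp_all [rfind_nil, Int.add_comm]; done)
    | (have hmin : min m.toNat s.length = s.length := by omega
       rw [hmin]
       simp_all)

-- blPick only looks at each f-value through its guard and, when the guard holds, its value
lemma blPick_congr (f g : Char → Int) (L : List (Int × Char))
    (h : ∀ rc ∈ L, (20 < f rc.2 ↔ 20 < g rc.2) ∧ (20 < f rc.2 → f rc.2 = g rc.2)) :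
    blPick f L = blPick g L := by
  induction L with
  | nil => rfl
  | cons rc rest ih =>
    obtain ⟨r, c⟩ := rc
    have hh := h (r, c) (List.mem_cons_self)
    simp only [blPick]
    by_cases hg : 20 < f c
    · rw [if_pos hg, if_pos (hh.1.mp hg), hh.2 hg]
    · rw [if_neg hg, if_neg (fun hc => hg (hh.1.mpr hc))]
      exact ih (fun rc hm => h rc (List.mem_cons_of_mem _ hm))

lemma blPick_mem (f : Char → Int) (L : List (Int × Char)) (p : Int × Int)
    (h : blPick f L = some p) : ∃ rc ∈ L, p = (-rc.1, f rc.2) ∧ 20 < f rc.2 := by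
  induction L with
  | nil => simp [blPick] at h
  | cons rc rest ih =>
    obtain ⟨r, c⟩ := rc
    simp only [blPick] at h
    by_cases hg : 20 < f c
    · rw [if_pos hg] at h
      exact ⟨(r, c), List.mem_cons_self, by simpa using h.symm, hg⟩
    · rw [if_neg hg] at h
      obtain ⟨rc', hm, hv⟩ := ih h
      exact ⟨rc', List.mem_cons_of_mem _ hm, hv⟩

-- raising one char's rightmost position to a new strict maximum n > 20 updates the ordered
-- search exactly the way one lex-max step over the new candidate (-rd, n) does
lemma blPick_update (f f' : Char → Int) (d : Char) (rd n : Int)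
    (hf' : ∀ c, f' c = if c = d then n else f c) (hn : 20 < n) :
    ∀ L : List (Int × Char), L.Pairwise (fun a b => a.1 < b.1) → (rd, d) ∈ L →
      (∀ rc ∈ L, rc.2 = d → rc.1 = rd) → (∀ rc ∈ L, f rc.2 < n) →
      blPick f' L = some (match blPick f L with
        | none => (-rd, n)
        | some m => blLexStep m (-rd, n)) := by
  intro L
  induction L with
  | nil => intro _ hmem; simp at hmem
  | cons rc rest ih =>
    intro hpw hmem huniq hbnd
    obtain ⟨r, c⟩ := rc
    by_cases hcd : c = d
    · have hr : r = rd := huniq (r, c) List.mem_cons_self hcd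
      have hfd : f' c = n := by rw [hf' c, if_pos hcd]
      simp only [blPick, hfd, if_pos hn]
      by_cases hg : 20 < f c
      · rw [if_pos hg]
        have hlt : f c < n := hbnd (r, c) List.mem_cons_self
        simp only [blLexStep]
        rw [if_pos (by simp; omega), hr]
      · rw [if_neg hg]
        cases hrest : blPick f rest with
        | none => rw [hr]
        | some m =>
          obtain ⟨rc', hm', hv', _⟩ := blPick_mem f rest m hrest
          have hlt : rd < rc'.1 := by
            have := (List.pairwise_cons.mp hpw).1 rc' hm'
            omega
          simp only [blLexStep, hv']
          rw [if_pos (by simp; omega), hr]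
    · have hfc : f' c = f c := by rw [hf' c, if_neg hcd]
      have hmem' : (rd, d) ∈ rest := by
        rcases List.mem_cons.mp hmem with h | h
        · exact absurd (congrArg Prod.snd h).symm hcd
        · exact h
      simp only [blPick, hfc]
      by_cases hg : 20 < f c
      · rw [if_pos hg, if_pos hg]
        have hlt : r < rd := (List.pairwise_cons.mp hpw).1 (rd, d) hmem'
        simp only [blLexStep]
        rw [if_neg (by simp; omega)]
      · rw [if_neg hg, if_neg hg]
        exact ih (List.pairwise_cons.mp hpw).2 hmem'
          (fun rc hm => huniq rc (List.mem_cons_of_mem _ hm))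
          (fun rc hm => hbnd rc (List.mem_cons_of_mem _ hm))

-- candidates of a snoc region: the old candidates plus (possibly) the new position
lemma blCandidates_snoc (cs : List Char) (d : Char) :
    blCandidates (cs ++ [d]) =
      blCandidates cs ++
        (if (decide (20 < (cs.length : Int)) && (blPrio.get? d).isSome) = true
          then [(-(blPrio.getD d 0), (cs.length : Int))] else []) := by
  unfold blCandidates
  rw [PySem.List.enumerate_append]
  have h1 : PySem.List.enumerate [d] (0 + (cs.length : Int)) = [((cs.length : Int), d)] := by
    simp [PySem.List.enumerate]
  rw [h1, List.filter_append, List.map_append]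
  congr 1
  rw [List.filter_singleton]
  simp only [Bool.cond_eq_ite, Bool.and_eq_true, decide_eq_true_eq]
  split_ifs with ha <;> simp_all

-- THE CENTRAL LEMMA: the lex-max over the candidate list equals the ordered priority search
-- over the rightmost-occurrence (rfind) values
lemma cand_max_eq_pick (cs : List Char) :
    PySem.List.max2? (blCandidates cs) (fun p => p.1) (fun p => p.2) =
      blPick (fun c => PySem.Chars.rfind cs [c]) blRanked := by
  induction cs using List.reverseRecOn with
  | nil => decide
  | append_singleton cs d ih =>
    rw [blCandidates_snoc]
    have hf' : ∀ c, PySem.Chars.rfind (cs ++ [d]) [c]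
        = if c = d then (cs.length : Int) else PySem.Chars.rfind cs [c] := by
      intro c
      rw [rfind_single_snoc]
      by_cases h : d = c
      · subst h; simp
      · rw [if_neg h, if_neg (fun hc => h hc.symm)]
    by_cases hbig : 20 < (cs.length : Int)
    · cases hget : blPrio.get? d with
      | none =>
        -- d is not a break char: no new candidate, rfind values unchanged on the break chars
        have hne : ∀ rc ∈ blRanked, rc.2 ≠ d := by
          intro rc hm heq
          rw [get?_blPrio] at hget
          fin_cases hm <;> subst heq <;> simp_all
        simp only [Option.isSome_none, Bool.and_false, Bool.false_eq_true, if_false,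
          List.append_nil]
        rw [ih]
        apply blPick_congr
        intro rc hm
        rw [hf' rc.2, if_neg (hne rc hm)]
        exact ⟨Iff.rfl, fun _ => rfl⟩
      | some rd =>
        -- d is a break char with rank rd, at a usable position
        simp only [Option.isSome_some, Bool.and_true, decide_eq_true_eq]
        rw [if_pos hbig, max2?_snoc, ih]
        have hgetD : blPrio.getD d 0 = rd := by
          simp [PySem.Dict.getD, hget]
        rw [hgetD]
        have hmem : (rd, d) ∈ blRanked := by
          rw [get?_blPrio] at hget
          split_ifs at hget with g1 g2 g3 g4 g5 g6 g7 g8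
          · subst g1; simp only [Option.some.injEq] at hget; subst hget; decide
          · subst g2; simp only [Option.some.injEq] at hget; subst hget; decide
          · subst g3; simp only [Option.some.injEq] at hget; subst hget; decide
          · subst g4; simp only [Option.some.injEq] at hget; subst hget; decide
          · subst g5; simp only [Option.some.injEq] at hget; subst hget; decide
          · subst g6; simp only [Option.some.injEq] at hget; subst hget; decide
          · subst g7; simp only [Option.some.injEq] at hget; subst hget; decide
          · subst g8; simp only [Option.some.injEq] at hget; subst hget; decide
        have huniq : ∀ rc ∈ blRanked, rc.2 = d → rc.1 = rd := by
          intro rc hm heq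
          rw [get?_blPrio] at hget
          fin_cases hm <;> subst heq <;> simp_all
        rw [blPick_update (fun c => PySem.Chars.rfind cs [c])
              (fun c => PySem.Chars.rfind (cs ++ [d]) [c]) d rd (cs.length : Int)
              hf' hbig blRanked (by decide) hmem huniq
              (fun rc _ => rfind_single_lt_length cs rc.2)]
    · -- the new position is ≤ 20: no new candidate, and no guard in the search can change
      have hsmall : ¬ (decide (20 < (cs.length : Int)) && (blPrio.get? d).isSome) = true := by
        simp [hbig]
      rw [if_neg hsmall, List.append_nil, ih]
      apply blPick_congr
      intro rc hm
      rw [hf' rc.2]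
      by_cases hcd : rc.2 = d
      · rw [if_pos hcd]
        have hlt := rfind_single_lt_length cs rc.2
        constructor
        · constructor
          · intro h; omega
          · intro h; omega
        · intro h; omega
      · rw [if_neg hcd]
        exact ⟨Iff.rfl, fun _ => rfl⟩

-- ===== VERDICT (by name: the statement is the Claim_ definition above) =====
theorem break_long_line_py_spec : Claim_equal_break_long_line_py := by
  intro line max_length indent _
  unfold Spec_break_long_line_py break_long_line_py break_long_line_py_alt
  split
  · rfl
  · have hkey : PySem.List.max2?
        (blCandidates (PySem.Chars.slice line.toList none (some max_length)))
        (fun p => p.1) (fun p => p.2) =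
        blPick (fun c => PySem.Chars.rfind
          (PySem.List.slice line.toList none (some max_length)) [c]) blRanked := by
      rw [show PySem.Chars.slice line.toList none (some max_length)
            = PySem.List.slice line.toList none (some max_length) from by
          simp [PySem.Chars.slice_eq_listSlice]]
      exact cand_max_eq_pick _
    rw [hkey]
    have h : ∀ c : Char, PySem.Str.rfindFrom line (String.ofList [c]) 0 (some max_length)
        = PySem.Chars.rfind (PySem.List.slice line.toList none (some max_length)) [c] := by
      intro c
      rw [PySem.Str.rfindFrom_eq]
      have h0 : (String.ofList [c]).toList = [c] := by simp
      rw [h0, rfindFrom_zero_eq]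
    have h1 := h ','
    have h2 := h ' '
    have h3 := h '+'
    have h4 := h '-'
    have h5 := h '*'
    have h6 := h '/'
    have h7 := h '('
    have h8 := h '['
    simp only [blBreakCharsA, blLoopA, blRanked, blPick]
    rw [show (",":String) = String.ofList [','] from rfl] at *
    rw [show (" ":String) = String.ofList [' '] from rfl] at *
    rw [show ("+":String) = String.ofList ['+'] from rfl] at *
    rw [show ("-":String) = String.ofList ['-'] from rfl] at *
    rw [show ("*":String) = String.ofList ['*'] from rfl] at *
    rw [show ("/":String) = String.ofList ['/'] from rfl] at *
    rw [show ("(":String) = String.ofList ['('] from rfl] at *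
    rw [show ("[":String) = String.ofList ['['] from rfl] at *
    rw [h1, h2, h3, h4, h5, h6, h7, h8]
    split_ifs <;> rfl
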